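-- pv_equiv track=rewrite | github.com/DmitriiUlianov/Codewars | 6 kyu kata/Find a Bunch of Common Elements of Two Lists in a Certain Range.py | find_arr
-- ===== SOURCE A (Python) =====
-- from collections import Counter
--
-- def find_arr(arr_a, arr_b, rng, wanted):
--     res = []
--     count_a = Counter(arr_a)
--     count_b = Counter(arr_b)
--     set_a = set(arr_a)
--     for i in set_a:
--         if rng[0] <= i <= rng[1]:
--             type = "odd" if i % 2 == 1 else "even"
--             if wanted == type:
--                 value_a = count_a.get(i)
--                 value_b = count_b.get(i, 0)
--                 if value_a >= 2 and value_b >= 2: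
--                     res.append(i)
--
--     return sorted(res)
-- ===== SOURCE B (Python) =====
-- def find_arr(arr_a, arr_b, rng, wanted):
--     # sort both lists and merge-scan runs two-pointer style: output is built
--     # already in increasing order, no Counter and no final sort needed
--     lo, hi = rng[0], rng[1]
--     a, b = sorted(arr_a), sorted(arr_b)
--     res = []
--     i = j = 0
--     while i < len(a) and j < len(b):
--         if a[i] < b[j]:
--             i += 1
--         elif b[j] < a[i]:
--             j += 1
--         else:
--             v = a[i]
--             ca = 0
--             while i < len(a) and a[i] == v:
--                 i += 1
--                 ca += 1
--             cb = 0
--             while j < len(b) and b[j] == v: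
--                 j += 1
--                 cb += 1
--             if ca >= 2 and cb >= 2 and lo <= v <= hi \
--                     and ("odd" if v % 2 == 1 else "even") == wanted:
--                 res.append(v)
--     return res
-- ===== Notes on version B (the rewrite author's own statement) =====
-- stated objective: alternative
-- what changed: B sorts both lists and does a two-pointer merge over runs of equal values, emitting qualifying values already in increasing order; no Counter, no hash structure and no final sort, where A counts with two Counters, scans set(arr_a) probing both, and sorts at the end.
-- outside the precondition, e.g. on find_arr([], [], [], 'odd'): A returns [], B raises IndexError; on find_arr([4], [4, 4], [9], 'even'): A returns [], B raises IndexError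
import Mathlib
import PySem

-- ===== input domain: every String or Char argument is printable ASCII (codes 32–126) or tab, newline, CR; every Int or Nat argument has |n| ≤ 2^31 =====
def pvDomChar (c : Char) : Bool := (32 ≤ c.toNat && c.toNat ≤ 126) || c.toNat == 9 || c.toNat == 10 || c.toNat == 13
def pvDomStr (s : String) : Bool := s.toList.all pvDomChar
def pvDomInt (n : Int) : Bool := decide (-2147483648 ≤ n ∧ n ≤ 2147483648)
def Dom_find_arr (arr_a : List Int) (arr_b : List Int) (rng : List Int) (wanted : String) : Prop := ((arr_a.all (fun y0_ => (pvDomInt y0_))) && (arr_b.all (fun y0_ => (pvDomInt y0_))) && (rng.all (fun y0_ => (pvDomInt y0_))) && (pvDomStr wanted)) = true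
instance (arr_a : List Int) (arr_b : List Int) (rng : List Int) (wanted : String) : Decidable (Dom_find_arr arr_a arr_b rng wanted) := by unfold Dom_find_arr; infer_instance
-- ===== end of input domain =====

-- B sorts both lists and merge-scans runs with two pointers, emitting the answer already
-- in increasing order (no Counter, no final sort); same task, a different algorithm.

-- ===== PORT A =====
-- Iterating Python's set here is order-insensitive: distinct elements are appended once and
-- the result is sorted, so the fold over PySem.Set.ofList arr_a is exact.
def find_arr (arr_a : List Int) (arr_b : List Int) (rng : List Int) (wanted : String) : List Int :=
  let count_a := PySem.Dict.counter (κ := Int) arr_a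
  let count_b := PySem.Dict.counter (κ := Int) arr_b
  let set_a : PySem.Set Int := PySem.Set.ofList arr_a
  let res := set_a.foldl (fun res i =>
    if PySem.List.pyGetD rng 0 0 ≤ i ∧ i ≤ PySem.List.pyGetD rng 1 0 then
      let ty := if PySem.Int.mod i 2 = 1 then "odd" else "even"
      if wanted = ty then
        -- count_a.get(i) is never None since i ∈ arr_a, so getD 0 is exact here
        if 2 ≤ count_a.getD i 0 ∧ 2 ≤ count_b.getD i 0 then res ++ [i] else res
      else res
    else res) []
  PySem.List.sorted res (fun x => x) false

-- ===== PORT B =====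
-- inner while of Source B: length of the run of v at the front of the list, and the remainder
def pvSpan (v : Int) : List Int → Nat × List Int
  | [] => (0, [])
  | x :: xs => if x = v then ((pvSpan v xs).1 + 1, (pvSpan v xs).2) else (0, x :: xs)

theorem pvSpan_length_le (v : Int) (l : List Int) : (pvSpan v l).2.length ≤ l.length := by
  induction l with
  | nil => simp [pvSpan]
  | cons x xs ih => simp only [pvSpan]; split <;> (simp; try omega)

-- outer while of Source B: two-pointer scan of the two sorted lists
def pvMerge (lo hi : Int) (wanted : String) : List Int → List Int → List Int
  | [], _ => []
  | _ :: _, [] => []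
  | x :: xs, y :: ys =>
    if x < y then pvMerge lo hi wanted xs (y :: ys)
    else if y < x then pvMerge lo hi wanted (x :: xs) ys
    else
      -- v = x = y; the two inner whiles consume the run of v from each list
      if 2 ≤ (pvSpan x xs).1 + 1 ∧ 2 ≤ (pvSpan x ys).1 + 1 ∧ lo ≤ x ∧ x ≤ hi ∧
          (if PySem.Int.mod x 2 = 1 then "odd" else "even") = wanted
      then x :: pvMerge lo hi wanted (pvSpan x xs).2 (pvSpan x ys).2
      else pvMerge lo hi wanted (pvSpan x xs).2 (pvSpan x ys).2
termination_by a b => a.length + b.length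
decreasing_by
  all_goals
    (have h1 := pvSpan_length_le x xs
     have h2 := pvSpan_length_le x ys
     simp; try omega)

def find_arr_alt (arr_a : List Int) (arr_b : List Int) (rng : List Int) (wanted : String) : List Int :=
  let lo := PySem.List.pyGetD rng 0 0
  let hi := PySem.List.pyGetD rng 1 0
  pvMerge lo hi wanted (PySem.List.sorted arr_a (fun x => x) false)
                       (PySem.List.sorted arr_b (fun x => x) false)

-- ===== PRECONDITION & SPEC =====
-- Pre_ excludes rng with fewer than two elements: there A's chained comparison normally
-- raises IndexError (and may accidentally return [] via short-circuit), while B always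
-- reads rng[0] and rng[1] and raises.
def Pre_find_arr (arr_a : List Int) (arr_b : List Int) (rng : List Int) (wanted : String) : Prop :=
  2 ≤ rng.length
instance (arr_a : List Int) (arr_b : List Int) (rng : List Int) (wanted : String) : Decidable (Pre_find_arr arr_a arr_b rng wanted) := by unfold Pre_find_arr; infer_instance

def pvWitness_find_arr : List Int × List Int × List Int × String := ([1, 3, 3, 4], [3, 3, 5], [0, 10], "odd")

def Spec_find_arr (arr_a : List Int) (arr_b : List Int) (rng : List Int) (wanted : String) (out : List Int) : Prop := out = find_arr_alt arr_a arr_b rng wanted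
instance (arr_a : List Int) (arr_b : List Int) (rng : List Int) (wanted : String) (out : List Int) : Decidable (Spec_find_arr arr_a arr_b rng wanted out) := by unfold Spec_find_arr; infer_instance

-- ===== CLAIM (what is proved, stated in full; the proofs are below) =====
def Claim_equal_find_arr : Prop := ∀ (arr_a : List Int) (arr_b : List Int) (rng : List Int) (wanted : String), Dom_find_arr arr_a arr_b rng wanted → Pre_find_arr arr_a arr_b rng wanted → Spec_find_arr arr_a arr_b rng wanted (find_arr arr_a arr_b rng wanted)

-- ===== LEMMAS AND PROOFS =====

-- the value-level property both programs test for an element v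
def pvQ (arr_a arr_b : List Int) (lo hi : Int) (wanted : String) (v : Int) : Prop :=
  lo ≤ v ∧ v ≤ hi ∧ wanted = (if PySem.Int.mod v 2 = 1 then "odd" else "even") ∧
    2 ≤ ((arr_a.count v : Int)) ∧ 2 ≤ ((arr_b.count v : Int))

-- span of a sorted list: run length = count, remainder keeps other counts and is all > v
theorem pvSpan_spec (x : Int) (xs : List Int) (hs : (x :: xs).Pairwise (· ≤ ·)) :
    (pvSpan x xs).1 = xs.count x ∧ ((pvSpan x xs).2).Pairwise (· ≤ ·) ∧
    (∀ z ∈ (pvSpan x xs).2, x < z) ∧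
    (∀ v, v ≠ x → (pvSpan x xs).2.count v = xs.count v) := by
  induction xs with
  | nil => simp [pvSpan]
  | cons h t ih =>
    rcases List.pairwise_cons.1 hs with ⟨hx, hht⟩
    by_cases hxe : h = x
    · subst hxe
      have ih' := ih hht
      simp only [pvSpan, if_pos]
      refine ⟨by simp [ih'.1], ih'.2.1, ih'.2.2.1, fun v hv => ?_⟩
      simp [ih'.2.2.2 v hv, Ne.symm hv]
    · have hlt : x < h := lt_of_le_of_ne (hx h (by simp)) (Ne.symm hxe)
      have hall : ∀ z ∈ h :: t, x < z := by
        intro z hz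
        rcases List.mem_cons.1 hz with rfl | hz
        · exact hlt
        · exact lt_of_lt_of_le hlt ((List.pairwise_cons.1 hht).1 z hz)
      have hcount0 : (h :: t).count x = 0 :=
        List.count_eq_zero.2 (fun hm => absurd rfl (ne_of_gt (hall x hm)).symm)
      simp only [pvSpan, if_neg hxe]
      exact ⟨hcount0.symm, hht, hall, fun v hv => trivial⟩

-- the merge of two sorted lists is strictly increasing and contains exactly the pvQ values
theorem pvMerge_spec (lo hi : Int) (wanted : String) (a b : List Int) :
    a.Pairwise (· ≤ ·) → b.Pairwise (· ≤ ·) →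
      (pvMerge lo hi wanted a b).Pairwise (· < ·) ∧
      ∀ v, v ∈ pvMerge lo hi wanted a b ↔ pvQ a b lo hi wanted v := by
  fun_induction pvMerge lo hi wanted a b with
  | case1 b => intro _ _; simp [pvQ]
  | case2 x xs => intro _ _; simp [pvQ]
  | case3 x xs y ys hxy ih =>
    intro ha hb
    rcases List.pairwise_cons.1 ha with ⟨hxall, hxs⟩
    have ih' := ih hxs hb
    refine ⟨ih'.1, fun v => ?_⟩
    rw [ih'.2 v]
    by_cases hvx : v = x
    · subst hvx
      have hb0 : (y :: ys).count v = 0 := by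
        rw [List.count_eq_zero]
        intro hmem
        rcases List.mem_cons.1 hmem with rfl | hmem
        · omega
        · have := (List.pairwise_cons.1 hb).1 v hmem; omega
      simp [pvQ, hb0]
    · simp [pvQ, List.count_cons, Ne.symm hvx]
  | case4 x xs y ys hxy hyx ih =>
    intro ha hb
    rcases List.pairwise_cons.1 hb with ⟨hyall, hys⟩
    have ih' := ih ha hys
    refine ⟨ih'.1, fun v => ?_⟩
    rw [ih'.2 v]
    by_cases hvy : v = y
    · subst hvy
      have ha0 : (x :: xs).count v = 0 := by
        rw [List.count_eq_zero]
        intro hmem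
        rcases List.mem_cons.1 hmem with rfl | hmem
        · omega
        · have := (List.pairwise_cons.1 ha).1 v hmem; omega
      simp [pvQ, ha0]
    · simp [pvQ, List.count_cons, Ne.symm hvy]
  | case5 x xs y ys hxy hyx hg ih =>
    intro ha hb
    have hxye : y = x := by omega
    subst hxye
    have sA := pvSpan_spec y xs ha
    have sB := pvSpan_spec y ys hb
    have ih' := ih sA.2.1 sB.2.1
    have hrest_gt : ∀ z ∈ pvMerge lo hi wanted (pvSpan y xs).2 (pvSpan y ys).2, y < z := by
      intro z hz
      rcases (ih'.2 z).1 hz with ⟨-, -, -, h1, -⟩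
      exact sA.2.2.1 z (List.count_pos_iff.1 (by omega))
    refine ⟨List.pairwise_cons.2 ⟨hrest_gt, ih'.1⟩, fun v => ?_⟩
    by_cases hvx : v = y
    · subst hvx
      simp only [List.mem_cons, true_or, true_iff]
      have h1 := sA.1
      have h2 := sB.1
      have hg1 := hg.1
      have hg2 := hg.2.1
      refine ⟨hg.2.2.1, hg.2.2.2.1, hg.2.2.2.2.symm, ?_, ?_⟩ <;>
        simp <;> omega
    · have heq : (v ∈ y :: pvMerge lo hi wanted (pvSpan y xs).2 (pvSpan y ys).2) ↔
          v ∈ pvMerge lo hi wanted (pvSpan y xs).2 (pvSpan y ys).2 := by simp [hvx]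
      rw [heq, ih'.2 v]
      simp [pvQ, Ne.symm hvx, sA.2.2.2 v hvx, sB.2.2.2 v hvx]
  | case6 x xs y ys hxy hyx hg ih =>
    intro ha hb
    have hxye : y = x := by omega
    subst hxye
    have sA := pvSpan_spec y xs ha
    have sB := pvSpan_spec y ys hb
    have ih' := ih sA.2.1 sB.2.1
    refine ⟨ih'.1, fun v => ?_⟩
    by_cases hvx : v = y
    · subst hvx
      have hnot : v ∉ pvMerge lo hi wanted (pvSpan v xs).2 (pvSpan v ys).2 := by
        rw [ih'.2 v]
        rintro ⟨-, -, -, h1, -⟩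
        have hm : v ∈ (pvSpan v xs).2 := List.count_pos_iff.1 (by omega)
        exact absurd rfl (ne_of_gt (sA.2.2.1 v hm)).symm
      simp only [hnot, false_iff]
      rintro ⟨h1, h2, h3, h4, h5⟩
      have hA := sA.1
      have hB := sB.1
      refine hg ⟨?_, ?_, h1, h2, h3.symm⟩ <;>
        simp at h4 h5 ⊢ <;> omega
    · rw [ih'.2 v]
      simp [pvQ, Ne.symm hvx, sA.2.2.2 v hvx, sB.2.2.2 v hvx]

set_option maxHeartbeats 1000000 in
theorem find_arr_spec : Claim_equal_find_arr := by
  intro arr_a arr_b rng wanted _hDom _hPre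
  simp only [Spec_find_arr, find_arr, find_arr_alt]
  -- A side: collapse the nested branches into one appended-filter fold
  have hstep : (fun (res : List Int) (i : Int) =>
      if PySem.List.pyGetD rng 0 0 ≤ i ∧ i ≤ PySem.List.pyGetD rng 1 0 then
        if wanted = (if PySem.Int.mod i 2 = 1 then "odd" else "even") then
          if 2 ≤ (PySem.Dict.counter (κ := Int) arr_a).getD i 0 ∧
             2 ≤ (PySem.Dict.counter (κ := Int) arr_b).getD i 0 then res ++ [i] else res
        else res
      else res)
      = (fun res i =>
      if PySem.List.pyGetD rng 0 0 ≤ i ∧ i ≤ PySem.List.pyGetD rng 1 0 ∧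
          wanted = (if PySem.Int.mod i 2 = 1 then "odd" else "even") ∧
          2 ≤ ((arr_a.count i : Int)) ∧ 2 ≤ ((arr_b.count i : Int))
      then res ++ [i] else res) := by
    funext res i
    simp only [PySem.Dict.getD_counter]
    split_ifs <;> simp_all
  rw [hstep, PySem.List.foldl_append_ite_eq_filter, List.nil_append]
  -- B side: characterise the merge of the two sorted lists
  have hspec := pvMerge_spec (PySem.List.pyGetD rng 0 0) (PySem.List.pyGetD rng 1 0) wanted
      (PySem.List.sorted arr_a (fun x => x) false) (PySem.List.sorted arr_b (fun x => x) false)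
      (PySem.List.sorted_pairwise arr_a (fun x => x))
      (PySem.List.sorted_pairwise arr_b (fun x => x))
  -- both sides are duplicate-free lists of exactly the pvQ values; B's is increasing
  have hnodupB : (pvMerge (PySem.List.pyGetD rng 0 0) (PySem.List.pyGetD rng 1 0) wanted
      (PySem.List.sorted arr_a (fun x => x) false) (PySem.List.sorted arr_b (fun x => x) false)).Nodup :=
    hspec.1.imp (fun h => ne_of_lt h)
  have hnodupL : ((PySem.Set.ofList arr_a).filter (fun i => decide (PySem.List.pyGetD rng 0 0 ≤ i ∧ i ≤ PySem.List.pyGetD rng 1 0 ∧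
          wanted = (if PySem.Int.mod i 2 = 1 then "odd" else "even") ∧
          2 ≤ ((arr_a.count i : Int)) ∧ 2 ≤ ((arr_b.count i : Int))))).Nodup :=
    (PySem.Set.nodup_ofList arr_a).filter _
  have hmem : ∀ v, v ∈ pvMerge (PySem.List.pyGetD rng 0 0) (PySem.List.pyGetD rng 1 0) wanted
      (PySem.List.sorted arr_a (fun x => x) false) (PySem.List.sorted arr_b (fun x => x) false) ↔
      v ∈ (PySem.Set.ofList arr_a).filter (fun i => decide (PySem.List.pyGetD rng 0 0 ≤ i ∧ i ≤ PySem.List.pyGetD rng 1 0 ∧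
          wanted = (if PySem.Int.mod i 2 = 1 then "odd" else "even") ∧
          2 ≤ ((arr_a.count i : Int)) ∧ 2 ≤ ((arr_b.count i : Int)))) := by
    intro v
    rw [hspec.2 v, List.mem_filter]
    simp only [decide_eq_true_eq, pvQ,
      (PySem.List.sorted_perm arr_a (fun x => x) false).count_eq v,
      (PySem.List.sorted_perm arr_b (fun x => x) false).count_eq v]
    constructor
    · rintro ⟨h1, h2, h3, h4, h5⟩
      have h0 : 0 < List.count v arr_a := by omega
      exact ⟨(PySem.Set.mem_ofList _ _).2 (List.count_pos_iff.1 h0), h1, h2, h3, h4, h5⟩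
    · rintro ⟨-, h⟩; exact h
  have hperm := (List.perm_ext_iff_of_nodup hnodupB hnodupL).2 hmem
  exact PySem.List.sorted_id_eq_of_perm_of_pairwise _ _ hperm
    (hspec.1.imp (fun h => le_of_lt h))
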